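-- pv_equiv track=rewrite | github.com/AunSyedShah/tz6_resume | src/nlp_features.py | categorize_skills
-- ===== SOURCE A (Python) =====
-- def categorize_skills(skills):
--     """
--     Categorize skills into groups.
--     """
--     categories = {
--         "Programming Languages": ["python", "java", "javascript", "c++", "c#"],
--         "Web Technologies": ["html", "css", "react", "angular", "node.js"],
--         "Databases": ["sql", "mysql", "postgresql", "mongodb", "oracle", "redis"],
--         "ML/AI": ["machine learning", "ai", "data science", "nlp", "deep learning", "tensorflow", "pytorch", "scikit-learn"],
--         "Tools": ["excel", "word", "powerpoint", "visio", "jira", "confluence", "git", "docker", "kubernetes"],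
--         "Cloud": ["aws", "azure", "gcp"],
--         "Methodologies": ["agile", "scrum", "kanban", "waterfall", "business analysis", "project management"],
--         "Other": []
--     }
--
--     categorized = {}
--     for category, skill_list in categories.items():
--         matched = [skill for skill in skills if skill in skill_list]
--         if matched:
--             categorized[category] = matched
--         if category == "Other":
--             other_skills = [skill for skill in skills if skill not in sum(categories.values(), [])]
--             if other_skills:
--                 categorized[category] = other_skills
--     return categorized
-- ===== SOURCE B (Python) =====
-- CATEGORIES = ["Programming Languages", "Web Technologies", "Databases", "ML/AI",
--               "Tools", "Cloud", "Methodologies", "Other"]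
--
-- SKILL_INDEX = {
--     "python": 0, "java": 0, "javascript": 0, "c++": 0, "c#": 0,
--     "html": 1, "css": 1, "react": 1, "angular": 1, "node.js": 1,
--     "sql": 2, "mysql": 2, "postgresql": 2, "mongodb": 2, "oracle": 2, "redis": 2,
--     "machine learning": 3, "ai": 3, "data science": 3, "nlp": 3, "deep learning": 3,
--     "tensorflow": 3, "pytorch": 3, "scikit-learn": 3,
--     "excel": 4, "word": 4, "powerpoint": 4, "visio": 4, "jira": 4, "confluence": 4,
--     "git": 4, "docker": 4, "kubernetes": 4,
--     "aws": 5, "azure": 5, "gcp": 5,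
--     "agile": 6, "scrum": 6, "kanban": 6, "waterfall": 6,
--     "business analysis": 6, "project management": 6,
-- }
--
--
-- def categorize_skills(skills):
--     """
--     Categorize skills into groups.
--     """
--     buckets = [[], [], [], [], [], [], [], []]
--     for skill in skills:
--         buckets[SKILL_INDEX.get(skill, 7)].append(skill)
--     return {CATEGORIES[i]: b for i, b in enumerate(buckets) if b}
-- ===== Notes on version B (the rewrite author's own statement) =====
-- stated objective: faster
-- what changed: Instead of rescanning the skills list once per category (plus a full rescan against the concatenation of all category lists for 'Other'), B keys a flat skill-to-category-index dict, makes a single pass over skills appending each into one of 8 positional buckets, and emits the non-empty buckets zipped with the fixed category-name list.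
import Mathlib
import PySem

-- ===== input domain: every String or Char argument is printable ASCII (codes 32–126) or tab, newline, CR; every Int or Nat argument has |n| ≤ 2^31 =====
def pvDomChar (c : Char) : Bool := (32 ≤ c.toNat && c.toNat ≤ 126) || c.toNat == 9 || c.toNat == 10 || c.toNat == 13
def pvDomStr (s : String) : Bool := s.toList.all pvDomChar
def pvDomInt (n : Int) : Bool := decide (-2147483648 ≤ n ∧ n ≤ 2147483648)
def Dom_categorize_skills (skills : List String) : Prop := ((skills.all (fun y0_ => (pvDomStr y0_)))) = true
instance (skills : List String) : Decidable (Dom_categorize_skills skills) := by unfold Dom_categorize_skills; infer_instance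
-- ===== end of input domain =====

set_option maxRecDepth 8000
set_option maxHeartbeats 3200000


-- B replaces A's per-category rescans of `skills` by a flat skill→bucket-index dict and a single
-- pass into 8 positional buckets (objective: faster, constant-factor); return values proved identical.

-- ===== PORT A =====
-- the literal `categories` dict of A
def pvCatsA : PySem.Dict String (List String) := PySem.Dict.mk [("Programming Languages", ["python", "java", "javascript", "c++", "c#"]), ("Web Technologies", ["html", "css", "react", "angular", "node.js"]), ("Databases", ["sql", "mysql", "postgresql", "mongodb", "oracle", "redis"]), ("ML/AI", ["machine learning", "ai", "data science", "nlp", "deep learning", "tensorflow", "pytorch", "scikit-learn"]), ("Tools", ["excel", "word", "powerpoint", "visio", "jira", "confluence", "git", "docker", "kubernetes"]), ("Cloud", ["aws", "azure", "gcp"]), ("Methodologies", ["agile", "scrum", "kanban", "waterfall", "business analysis", "project management"]), ("Other", [])]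

def categorize_skills (skills : List String) : List (String × List String) :=
  (pvCatsA.items.foldl (fun categorized p =>
    let matched := skills.filter (fun s => p.2.contains s)
    let categorized := if matched = [] then categorized else categorized.insert p.1 matched
    if p.1 == "Other" then
      let other_skills := skills.filter (fun s => !((pvCatsA.values.foldl (fun a b => a ++ b) []).contains s))
      if other_skills = [] then categorized else categorized.insert p.1 other_skills
    else categorized) PySem.Dict.empty).items

-- ===== PORT B =====
-- CATEGORIES: the fixed category names in order
def pvCategories : List String := ["Programming Languages", "Web Technologies", "Databases", "ML/AI", "Tools", "Cloud", "Methodologies", "Other"]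

-- SKILL_INDEX: flat skill → bucket-index dict, as Source B declares it literally
def pvSkillIndex : PySem.Dict String Int := PySem.Dict.mk [("python", 0), ("java", 0), ("javascript", 0), ("c++", 0), ("c#", 0), ("html", 1), ("css", 1), ("react", 1), ("angular", 1), ("node.js", 1), ("sql", 2), ("mysql", 2), ("postgresql", 2), ("mongodb", 2), ("oracle", 2), ("redis", 2), ("machine learning", 3), ("ai", 3), ("data science", 3), ("nlp", 3), ("deep learning", 3), ("tensorflow", 3), ("pytorch", 3), ("scikit-learn", 3), ("excel", 4), ("word", 4), ("powerpoint", 4), ("visio", 4), ("jira", 4), ("confluence", 4), ("git", 4), ("docker", 4), ("kubernetes", 4), ("aws", 5), ("azure", 5), ("gcp", 5), ("agile", 6), ("scrum", 6), ("kanban", 6), ("waterfall", 6), ("business analysis", 6), ("project management", 6)]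

-- buckets[k].append(skill): read-modify-write at index k (k = SKILL_INDEX.get(skill, 7) ∈ [0,7], so exact)
def pvAppendAt (bs : List (List String)) (k : Int) (s : String) : List (List String) :=
  PySem.List.pySetD bs k (PySem.List.pyGetD bs k [] ++ [s])

def categorize_skills_alt (skills : List String) : List (String × List String) :=
  let buckets := skills.foldl (fun bs s => pvAppendAt bs (pvSkillIndex.getD s 7) s)
    [[], [], [], [], [], [], [], []]
  (PySem.List.enumerate buckets).filterMap (fun p =>
    if p.2 = [] then none
    else (PySem.List.pyGet? pvCategories p.1).map (fun c => (c, p.2)))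

-- ===== PRECONDITION & SPEC =====
def Spec_categorize_skills (skills : List String) (out : List (String × List String)) : Prop := out = categorize_skills_alt skills
instance (skills : List String) (out : List (String × List String)) : Decidable (Spec_categorize_skills skills out) := by unfold Spec_categorize_skills; infer_instance

-- ===== CLAIM (what is proved, stated in full; the proofs are below) =====
def Claim_equal_categorize_skills : Prop := ∀ (skills : List String), Dom_categorize_skills skills → Spec_categorize_skills skills (categorize_skills skills)

-- ===== LEMMAS AND PROOFS =====

def pvAllSkills : List String := ["python", "java", "javascript", "c++", "c#", "html", "css", "react", "angular", "node.js", "sql", "mysql", "postgresql", "mongodb", "oracle", "redis", "machine learning", "ai", "data science", "nlp", "deep learning", "tensorflow", "pytorch", "scikit-learn", "excel", "word", "powerpoint", "visio", "jira", "confluence", "git", "docker", "kubernetes", "aws", "azure", "gcp", "agile", "scrum", "kanban", "waterfall", "business analysis", "project management"]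

def pvIdxOf (s : String) : Int := pvSkillIndex.getD s 7

lemma pvIdxOf_other (s : String) (h : s ∉ pvAllSkills) : pvIdxOf s = 7 := by
  simp only [pvAllSkills, List.mem_cons, List.not_mem_nil, or_false, not_or] at h
  obtain ⟨h1, h2, h3, h4, h5, h6, h7, h8, h9, h10, h11, h12, h13, h14, h15, h16, h17, h18, h19, h20, h21, h22, h23, h24, h25, h26, h27, h28, h29, h30, h31, h32, h33, h34, h35, h36, h37, h38, h39, h40, h41, h42⟩ := h
  simp [pvIdxOf, pvSkillIndex, PySem.Dict.getD_eq_get?_getD, PySem.Dict.get?_mk_cons,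
    Ne.symm h1, Ne.symm h2, Ne.symm h3, Ne.symm h4, Ne.symm h5, Ne.symm h6, Ne.symm h7, Ne.symm h8, Ne.symm h9, Ne.symm h10, Ne.symm h11, Ne.symm h12, Ne.symm h13, Ne.symm h14, Ne.symm h15, Ne.symm h16, Ne.symm h17, Ne.symm h18, Ne.symm h19, Ne.symm h20, Ne.symm h21, Ne.symm h22, Ne.symm h23, Ne.symm h24, Ne.symm h25, Ne.symm h26, Ne.symm h27, Ne.symm h28, Ne.symm h29, Ne.symm h30, Ne.symm h31, Ne.symm h32, Ne.symm h33, Ne.symm h34, Ne.symm h35, Ne.symm h36, Ne.symm h37, Ne.symm h38, Ne.symm h39, Ne.symm h40, Ne.symm h41, Ne.symm h42]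
  rfl

lemma pvIdx_bound (s : String) : 0 ≤ pvIdxOf s ∧ pvIdxOf s < 8 := by
  by_cases h : s ∈ pvAllSkills
  · fin_cases h <;> decide
  · rw [pvIdxOf_other s h]; decide

lemma pvQ1 (s : String) : (pvIdxOf s == (0 : Int)) = ((["python", "java", "javascript", "c++", "c#"] : List String).contains s) := by
  by_cases h : s ∈ pvAllSkills
  · fin_cases h <;> decide
  · rw [pvIdxOf_other s h]
    have hns : ¬ ((["python", "java", "javascript", "c++", "c#"] : List String).contains s = true) := by
      intro hc; exact h (by simp only [pvAllSkills]; simp only [List.contains_eq_mem, List.mem_cons, List.not_mem_nil, decide_eq_true_eq] at hc ⊢; tauto)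
    simp at hns ⊢
    exact hns

lemma pvQ2 (s : String) : (pvIdxOf s == (1 : Int)) = ((["html", "css", "react", "angular", "node.js"] : List String).contains s) := by
  by_cases h : s ∈ pvAllSkills
  · fin_cases h <;> decide
  · rw [pvIdxOf_other s h]
    have hns : ¬ ((["html", "css", "react", "angular", "node.js"] : List String).contains s = true) := by
      intro hc; exact h (by simp only [pvAllSkills]; simp only [List.contains_eq_mem, List.mem_cons, List.not_mem_nil, decide_eq_true_eq] at hc ⊢; tauto)
    simp at hns ⊢
    exact hns

lemma pvQ3 (s : String) : (pvIdxOf s == (2 : Int)) = ((["sql", "mysql", "postgresql", "mongodb", "oracle", "redis"] : List String).contains s) := by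
  by_cases h : s ∈ pvAllSkills
  · fin_cases h <;> decide
  · rw [pvIdxOf_other s h]
    have hns : ¬ ((["sql", "mysql", "postgresql", "mongodb", "oracle", "redis"] : List String).contains s = true) := by
      intro hc; exact h (by simp only [pvAllSkills]; simp only [List.contains_eq_mem, List.mem_cons, List.not_mem_nil, decide_eq_true_eq] at hc ⊢; tauto)
    simp at hns ⊢
    exact hns

lemma pvQ4 (s : String) : (pvIdxOf s == (3 : Int)) = ((["machine learning", "ai", "data science", "nlp", "deep learning", "tensorflow", "pytorch", "scikit-learn"] : List String).contains s) := by
  by_cases h : s ∈ pvAllSkills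
  · fin_cases h <;> decide
  · rw [pvIdxOf_other s h]
    have hns : ¬ ((["machine learning", "ai", "data science", "nlp", "deep learning", "tensorflow", "pytorch", "scikit-learn"] : List String).contains s = true) := by
      intro hc; exact h (by simp only [pvAllSkills]; simp only [List.contains_eq_mem, List.mem_cons, List.not_mem_nil, decide_eq_true_eq] at hc ⊢; tauto)
    simp at hns ⊢
    exact hns

lemma pvQ5 (s : String) : (pvIdxOf s == (4 : Int)) = ((["excel", "word", "powerpoint", "visio", "jira", "confluence", "git", "docker", "kubernetes"] : List String).contains s) := by
  by_cases h : s ∈ pvAllSkills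
  · fin_cases h <;> decide
  · rw [pvIdxOf_other s h]
    have hns : ¬ ((["excel", "word", "powerpoint", "visio", "jira", "confluence", "git", "docker", "kubernetes"] : List String).contains s = true) := by
      intro hc; exact h (by simp only [pvAllSkills]; simp only [List.contains_eq_mem, List.mem_cons, List.not_mem_nil, decide_eq_true_eq] at hc ⊢; tauto)
    simp at hns ⊢
    exact hns

lemma pvQ6 (s : String) : (pvIdxOf s == (5 : Int)) = ((["aws", "azure", "gcp"] : List String).contains s) := by
  by_cases h : s ∈ pvAllSkills
  · fin_cases h <;> decide
  · rw [pvIdxOf_other s h]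
    have hns : ¬ ((["aws", "azure", "gcp"] : List String).contains s = true) := by
      intro hc; exact h (by simp only [pvAllSkills]; simp only [List.contains_eq_mem, List.mem_cons, List.not_mem_nil, decide_eq_true_eq] at hc ⊢; tauto)
    simp at hns ⊢
    exact hns

lemma pvQ7 (s : String) : (pvIdxOf s == (6 : Int)) = ((["agile", "scrum", "kanban", "waterfall", "business analysis", "project management"] : List String).contains s) := by
  by_cases h : s ∈ pvAllSkills
  · fin_cases h <;> decide
  · rw [pvIdxOf_other s h]
    have hns : ¬ ((["agile", "scrum", "kanban", "waterfall", "business analysis", "project management"] : List String).contains s = true) := by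
      intro hc; exact h (by simp only [pvAllSkills]; simp only [List.contains_eq_mem, List.mem_cons, List.not_mem_nil, decide_eq_true_eq] at hc ⊢; tauto)
    simp at hns ⊢
    exact hns

lemma pvQ8 (s : String) : (pvIdxOf s == (7 : Int)) = (!(pvAllSkills.contains s)) := by
  by_cases h : s ∈ pvAllSkills
  · fin_cases h <;> decide
  · rw [pvIdxOf_other s h]
    simp [List.contains_eq_mem, h]

-- bucket invariant of B's single pass
lemma pvBuckAux (l : List String) : ∀ bs : List (List String), bs.length = 8 →
    (l.foldl (fun bs s => pvAppendAt bs (pvIdxOf s) s) bs).length = 8 ∧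
    ∀ j : Nat, j < 8 →
      (l.foldl (fun bs s => pvAppendAt bs (pvIdxOf s) s) bs).getD j []
        = bs.getD j [] ++ l.filter (fun s => pvIdxOf s == (j : Int)) := by
  induction l with
  | nil => intro bs h; simp [h]
  | cons s l ih =>
    intro bs hlen
    obtain ⟨hb0, hb1⟩ := pvIdx_bound s
    have hin : pvIdxOf s = ((pvIdxOf s).toNat : Int) := by omega
    have hnlt : (pvIdxOf s).toNat < 8 := by omega
    have hstep : pvAppendAt bs (pvIdxOf s) s
        = bs.set (pvIdxOf s).toNat (bs.getD (pvIdxOf s).toNat [] ++ [s]) := by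
      rw [pvAppendAt, hin, PySem.List.pySetD_natCast, PySem.List.pyGetD_natCast]
      simp [max_eq_left hb0]
    have hlen' : (bs.set (pvIdxOf s).toNat (bs.getD (pvIdxOf s).toNat [] ++ [s])).length = 8 := by
      simp [hlen]
    obtain ⟨ihl, ihg⟩ := ih _ hlen'
    constructor
    · simpa [List.foldl_cons, hstep] using ihl
    · intro j hj
      rw [List.foldl_cons, hstep, ihg j hj, List.filter_cons]
      by_cases hc : (pvIdxOf s == (j : Int)) = true
      · have hje : (pvIdxOf s).toNat = j := by
          have : pvIdxOf s = (j : Int) := by simpa using hc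
          omega
        rw [hje] at *
        rw [hc]
        simp [List.getD_eq_getElem?_getD, hlen, hj, List.append_assoc]
      · have hne : (pvIdxOf s).toNat ≠ j := by
          intro h; exact hc (by simp [← h, ← hin])
        rw [Bool.not_eq_true] at hc
        rw [hc]
        simp [List.getD_eq_getElem?_getD, List.getElem?_set_ne hne]

lemma pvEmit (b : List String) (i : Int) (c : String) (hc : PySem.List.pyGet? pvCategories i = some c) :
    (((fun p : Int × List String => if p.2 = [] then none
        else (PySem.List.pyGet? pvCategories p.1).map (fun c => (c, p.2))) (i, b)) |>.toList)
      = if b = [] then [] else [(c, b)] := by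
  split_ifs with h <;> simp [h, hc]

lemma pvFM {α β : Type} (f : α → Option β) (L : List α) :
    L.filterMap f = L.flatMap (fun a => (f a).toList) := by
  induction L with
  | nil => simp
  | cons a L ih => cases h : f a <;> simp [h, ih]

def pvBody (skills : List String) (categorized : PySem.Dict String (List String))
    (p : String × List String) : PySem.Dict String (List String) :=
  let matched := skills.filter (fun s => p.2.contains s)
  let categorized := if matched = [] then categorized else categorized.insert p.1 matched
  if p.1 == "Other" then
    let other_skills := skills.filter (fun s => !((pvCatsA.values.foldl (fun a b => a ++ b) []).contains s))
    if other_skills = [] then categorized else categorized.insert p.1 other_skills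
  else categorized

lemma pvGitems (skills : List String) (L : List (String × List String)) :
    ∀ d : PySem.Dict String (List String),
    (∀ p ∈ L, d.contains p.1 = false) → (L.map Prod.fst).Nodup → (∀ p ∈ L, ¬ p.1 = "Other") →
    (L.foldl (pvBody skills) d).items
        = d.items ++ L.flatMap (fun p =>
            if skills.filter (fun s => p.2.contains s) = [] then []
            else [(p.1, skills.filter (fun s => p.2.contains s))])
      ∧ ∀ k, (L.foldl (pvBody skills) d).contains k = true → d.contains k = true ∨ k ∈ L.map Prod.fst := by
  induction L with
  | nil => intro d _ _ _; simp
  | cons p L ih =>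
    intro d hd hnd hoth
    have hpo : (p.1 == "Other") = false := by
      simp [hoth p List.mem_cons_self]
    have hbody : pvBody skills d p =
        if skills.filter (fun s => p.2.contains s) = [] then d
        else d.insert p.1 (skills.filter (fun s => p.2.contains s)) := by
      simp [pvBody, hpo]
    simp only [List.foldl_cons, List.flatMap_cons, List.map_cons, hbody]
    have hndtail : (L.map Prod.fst).Nodup := (List.nodup_cons.mp (by simpa using hnd)).2
    have hhead : p.1 ∉ L.map Prod.fst := (List.nodup_cons.mp (by simpa using hnd)).1
    by_cases hm : skills.filter (fun s => p.2.contains s) = []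
    · rw [if_pos hm, if_pos hm]
      obtain ⟨h1, h2⟩ := ih d (fun q hq => hd q (List.mem_cons_of_mem p hq)) hndtail
        (fun q hq => hoth q (List.mem_cons_of_mem p hq))
      refine ⟨by simp [h1], fun k hk => ?_⟩
      rcases h2 k hk with h | h
      · exact Or.inl h
      · exact Or.inr (List.mem_cons_of_mem _ h)
    · rw [if_neg hm, if_neg hm]
      have hfresh : d.contains p.1 = false := hd p List.mem_cons_self
      have hd' : ∀ q ∈ L, (d.insert p.1 (skills.filter (fun s => p.2.contains s))).contains q.1 = false := by
        intro q hq
        rw [PySem.Dict.contains_insert]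
        have hne : ¬ q.1 = p.1 := by
          intro h; exact hhead (h ▸ List.mem_map_of_mem hq)
        simp [hne, hd q (List.mem_cons_of_mem p hq)]
      obtain ⟨h1, h2⟩ := ih _ hd' hndtail (fun q hq => hoth q (List.mem_cons_of_mem p hq))
      have hitems : (d.insert p.1 (skills.filter (fun s => p.2.contains s))).items
          = d.items ++ [(p.1, skills.filter (fun s => p.2.contains s))] := by
        simp [PySem.Dict.items_insert, hfresh]
      refine ⟨by rw [h1, hitems]; simp [List.append_assoc], fun k hk => ?_⟩
      rcases h2 k hk with h | h
      · rw [PySem.Dict.contains_insert] at h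
        rcases Bool.or_eq_true_iff.mp h with h | h
        · exact Or.inr (by simp [eq_of_beq h])
        · exact Or.inl h
      · exact Or.inr (List.mem_cons_of_mem _ h)

lemma pvCanonA (skills : List String) : categorize_skills skills = (if skills.filter (fun s => (["python", "java", "javascript", "c++", "c#"] : List String).contains s) = [] then [] else [("Programming Languages", skills.filter (fun s => (["python", "java", "javascript", "c++", "c#"] : List String).contains s))]) ++ (if skills.filter (fun s => (["html", "css", "react", "angular", "node.js"] : List String).contains s) = [] then [] else [("Web Technologies", skills.filter (fun s => (["html", "css", "react", "angular", "node.js"] : List String).contains s))]) ++ (if skills.filter (fun s => (["sql", "mysql", "postgresql", "mongodb", "oracle", "redis"] : List String).contains s) = [] then [] else [("Databases", skills.filter (fun s => (["sql", "mysql", "postgresql", "mongodb", "oracle", "redis"] : List String).contains s))]) ++ (if skills.filter (fun s => (["machine learning", "ai", "data science", "nlp", "deep learning", "tensorflow", "pytorch", "scikit-learn"] : List String).contains s) = [] then [] else [("ML/AI", skills.filter (fun s => (["machine learning", "ai", "data science", "nlp", "deep learning", "tensorflow", "pytorch", "scikit-learn"] : List String).contains s))]) ++ (if skills.filter (fun s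 => (["excel", "word", "powerpoint", "visio", "jira", "confluence", "git", "docker", "kubernetes"] : List String).contains s) = [] then [] else [("Tools", skills.filter (fun s => (["excel", "word", "powerpoint", "visio", "jira", "confluence", "git", "docker", "kubernetes"] : List String).contains s))]) ++ (if skills.filter (fun s => (["aws", "azure", "gcp"] : List String).contains s) = [] then [] else [("Cloud", skills.filter (fun s => (["aws", "azure", "gcp"] : List String).contains s))]) ++ (if skills.filter (fun s => (["agile", "scrum", "kanban", "waterfall", "business analysis", "project management"] : List String).contains s) = [] then [] else [("Methodologies", skills.filter (fun s => (["agile", "scrum", "kanban", "waterfall", "business analysis", "project management"] : List String).contains s))]) ++ (if skills.filter (fun s => !((pvAllSkills).contains s)) = [] then [] else [("Other", skills.filter (fun s => !((pvAllSkills).contains s)))]) := by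
  have hrepr : categorize_skills skills = (pvCatsA.items.foldl (pvBody skills) PySem.Dict.empty).items := rfl
  have hv : (pvCatsA.values.foldl (fun a b => a ++ b) []) = pvAllSkills := by decide
  have hsplit : pvCatsA.items = [("Programming Languages", ["python", "java", "javascript", "c++", "c#"]),
         ("Web Technologies", ["html", "css", "react", "angular", "node.js"]),
         ("Databases", ["sql", "mysql", "postgresql", "mongodb", "oracle", "redis"]),
         ("ML/AI", ["machine learning", "ai", "data science", "nlp", "deep learning", "tensorflow", "pytorch", "scikit-learn"]),
         ("Tools", ["excel", "word", "powerpoint", "visio", "jira", "confluence", "git", "docker", "kubernetes"]),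
         ("Cloud", ["aws", "azure", "gcp"]),
         ("Methodologies", ["agile", "scrum", "kanban", "waterfall", "business analysis", "project management"])] ++ [("Other", ([] : List String))] := rfl
  rw [hrepr, hsplit, List.foldl_append]
  obtain ⟨h1, h2⟩ := pvGitems skills [("Programming Languages", ["python", "java", "javascript", "c++", "c#"]),
         ("Web Technologies", ["html", "css", "react", "angular", "node.js"]),
         ("Databases", ["sql", "mysql", "postgresql", "mongodb", "oracle", "redis"]),
         ("ML/AI", ["machine learning", "ai", "data science", "nlp", "deep learning", "tensorflow", "pytorch", "scikit-learn"]),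
         ("Tools", ["excel", "word", "powerpoint", "visio", "jira", "confluence", "git", "docker", "kubernetes"]),
         ("Cloud", ["aws", "azure", "gcp"]),
         ("Methodologies", ["agile", "scrum", "kanban", "waterfall", "business analysis", "project management"])] PySem.Dict.empty (by intro p _; rfl) (by decide) (by decide)
  generalize hd7 : List.foldl (pvBody skills) PySem.Dict.empty [("Programming Languages", ["python", "java", "javascript", "c++", "c#"]),
         ("Web Technologies", ["html", "css", "react", "angular", "node.js"]),
         ("Databases", ["sql", "mysql", "postgresql", "mongodb", "oracle", "redis"]),
         ("ML/AI", ["machine learning", "ai", "data science", "nlp", "deep learning", "tensorflow", "pytorch", "scikit-learn"]),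
         ("Tools", ["excel", "word", "powerpoint", "visio", "jira", "confluence", "git", "docker", "kubernetes"]),
         ("Cloud", ["aws", "azure", "gcp"]),
         ("Methodologies", ["agile", "scrum", "kanban", "waterfall", "business analysis", "project management"])] = d7 at h1 h2 ⊢
  have hoc : d7.contains "Other" = false := by
    cases h : d7.contains "Other"
    · rfl
    · rcases h2 _ h with h | h
      · exact absurd h (by decide)
      · exact absurd h (by decide)
  have hemp : PySem.Dict.empty.items = ([] : List (String × List String)) := rfl
  simp only [List.foldl_cons, List.foldl_nil]
  have hstep : pvBody skills d7 ("Other", ([] : List String))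
      = if skills.filter (fun s => !(pvAllSkills.contains s)) = [] then d7
        else d7.insert "Other" (skills.filter (fun s => !(pvAllSkills.contains s))) := by
    simp [pvBody, hv]
  rw [hstep]
  by_cases ho : skills.filter (fun s => !(pvAllSkills.contains s)) = []
  · rw [if_pos ho, h1, if_pos ho, hemp]
    simp only [List.flatMap_cons, List.flatMap_nil, List.nil_append, List.append_nil, List.append_assoc]
  · rw [if_neg ho]
    have hins : (d7.insert "Other" (skills.filter (fun s => !(pvAllSkills.contains s)))).items
        = d7.items ++ [("Other", skills.filter (fun s => !(pvAllSkills.contains s)))] := by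
      simp [PySem.Dict.items_insert, hoc]
    rw [hins, h1, if_neg ho, hemp]
    simp only [List.flatMap_cons, List.flatMap_nil, List.nil_append, List.append_nil, List.append_assoc]

lemma pvCanonB (skills : List String) : categorize_skills_alt skills = (if skills.filter (fun s => (["python", "java", "javascript", "c++", "c#"] : List String).contains s) = [] then [] else [("Programming Languages", skills.filter (fun s => (["python", "java", "javascript", "c++", "c#"] : List String).contains s))]) ++ (if skills.filter (fun s => (["html", "css", "react", "angular", "node.js"] : List String).contains s) = [] then [] else [("Web Technologies", skills.filter (fun s => (["html", "css", "react", "angular", "node.js"] : List String).contains s))]) ++ (if skills.filter (fun s => (["sql", "mysql", "postgresql", "mongodb", "oracle", "redis"] : List String).contains s) = [] then [] else [("Databases", skills.filter (fun s => (["sql", "mysql", "postgresql", "mongodb", "oracle", "redis"] : List String).contains s))]) ++ (if skills.filter (fun s => (["machine learning", "ai", "data science", "nlp", "deep learning", "tensorflow", "pytorch", "scikit-learn"] : List String).contains s) = [] then [] else [("ML/AI", skills.filter (fun s => (["machine learning", "ai", "data science", "nlp", "deep learning", "tensorflow", "pytorch", "scikit-learn"] : List String).contains s))]) ++ (if skills.filter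 (fun s => (["excel", "word", "powerpoint", "visio", "jira", "confluence", "git", "docker", "kubernetes"] : List String).contains s) = [] then [] else [("Tools", skills.filter (fun s => (["excel", "word", "powerpoint", "visio", "jira", "confluence", "git", "docker", "kubernetes"] : List String).contains s))]) ++ (if skills.filter (fun s => (["aws", "azure", "gcp"] : List String).contains s) = [] then [] else [("Cloud", skills.filter (fun s => (["aws", "azure", "gcp"] : List String).contains s))]) ++ (if skills.filter (fun s => (["agile", "scrum", "kanban", "waterfall", "business analysis", "project management"] : List String).contains s) = [] then [] else [("Methodologies", skills.filter (fun s => (["agile", "scrum", "kanban", "waterfall", "business analysis", "project management"] : List String).contains s))]) ++ (if skills.filter (fun s => !((pvAllSkills).contains s)) = [] then [] else [("Other", skills.filter (fun s => !((pvAllSkills).contains s)))]) := by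
  have hrepr : categorize_skills_alt skills
      = (PySem.List.enumerate (skills.foldl (fun bs s => pvAppendAt bs (pvIdxOf s) s)
          [[], [], [], [], [], [], [], []])).filterMap (fun p =>
            if p.2 = [] then none
            else (PySem.List.pyGet? pvCategories p.1).map (fun c => (c, p.2))) := rfl
  obtain ⟨hL, hG⟩ := pvBuckAux skills [[], [], [], [], [], [], [], []] rfl
  set buckets := skills.foldl (fun bs s => pvAppendAt bs (pvIdxOf s) s)
    [[], [], [], [], [], [], [], []] with hbk
  have hGD : ∀ j : Nat, j < 8 → buckets.getD j [] = skills.filter (fun s => pvIdxOf s == (j : Int)) := by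
    intro j hj
    rw [hG j hj]
    interval_cases j <;> rfl
  have hb : buckets = [skills.filter (fun s => pvIdxOf s == (0 : Int)),
      skills.filter (fun s => pvIdxOf s == (1 : Int)), skills.filter (fun s => pvIdxOf s == (2 : Int)),
      skills.filter (fun s => pvIdxOf s == (3 : Int)), skills.filter (fun s => pvIdxOf s == (4 : Int)),
      skills.filter (fun s => pvIdxOf s == (5 : Int)), skills.filter (fun s => pvIdxOf s == (6 : Int)),
      skills.filter (fun s => pvIdxOf s == (7 : Int))] := by
    apply List.ext_getElem (by simp [hL])
    intro i h1 h2
    have hi8 : i < 8 := by omega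
    have := hGD i hi8
    rw [List.getD_eq_getElem buckets [] (by omega)] at this
    rw [this]
    interval_cases i <;> rfl
  have henum : PySem.List.enumerate [skills.filter (fun s => pvIdxOf s == (0 : Int)),
      skills.filter (fun s => pvIdxOf s == (1 : Int)), skills.filter (fun s => pvIdxOf s == (2 : Int)),
      skills.filter (fun s => pvIdxOf s == (3 : Int)), skills.filter (fun s => pvIdxOf s == (4 : Int)),
      skills.filter (fun s => pvIdxOf s == (5 : Int)), skills.filter (fun s => pvIdxOf s == (6 : Int)),
      skills.filter (fun s => pvIdxOf s == (7 : Int))]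
      = [((0 : Int), skills.filter (fun s => pvIdxOf s == (0 : Int))),
         (1, skills.filter (fun s => pvIdxOf s == (1 : Int))),
         (2, skills.filter (fun s => pvIdxOf s == (2 : Int))),
         (3, skills.filter (fun s => pvIdxOf s == (3 : Int))),
         (4, skills.filter (fun s => pvIdxOf s == (4 : Int))),
         (5, skills.filter (fun s => pvIdxOf s == (5 : Int))),
         (6, skills.filter (fun s => pvIdxOf s == (6 : Int))),
         (7, skills.filter (fun s => pvIdxOf s == (7 : Int)))] := by
    simp [PySem.List.enumerate_cons, PySem.List.enumerate_nil]
  have e1 : (fun s => (pvIdxOf s == (0 : Int))) = (fun s => (["python", "java", "javascript", "c++", "c#"] : List String).contains s) := funext pvQ1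
  have e2 : (fun s => (pvIdxOf s == (1 : Int))) = (fun s => (["html", "css", "react", "angular", "node.js"] : List String).contains s) := funext pvQ2
  have e3 : (fun s => (pvIdxOf s == (2 : Int))) = (fun s => (["sql", "mysql", "postgresql", "mongodb", "oracle", "redis"] : List String).contains s) := funext pvQ3
  have e4 : (fun s => (pvIdxOf s == (3 : Int))) = (fun s => (["machine learning", "ai", "data science", "nlp", "deep learning", "tensorflow", "pytorch", "scikit-learn"] : List String).contains s) := funext pvQ4
  have e5 : (fun s => (pvIdxOf s == (4 : Int))) = (fun s => (["excel", "word", "powerpoint", "visio", "jira", "confluence", "git", "docker", "kubernetes"] : List String).contains s) := funext pvQ5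
  have e6 : (fun s => (pvIdxOf s == (5 : Int))) = (fun s => (["aws", "azure", "gcp"] : List String).contains s) := funext pvQ6
  have e7 : (fun s => (pvIdxOf s == (6 : Int))) = (fun s => (["agile", "scrum", "kanban", "waterfall", "business analysis", "project management"] : List String).contains s) := funext pvQ7
  have e8 : (fun s => (pvIdxOf s == (7 : Int))) = (fun s => !(pvAllSkills.contains s)) := funext pvQ8
  rw [hrepr, hb, henum, pvFM]
  simp only [List.flatMap_cons, List.flatMap_nil, List.append_nil]
  rw [pvEmit _ 0 "Programming Languages" (by decide), pvEmit _ 1 "Web Technologies" (by decide),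
      pvEmit _ 2 "Databases" (by decide), pvEmit _ 3 "ML/AI" (by decide),
      pvEmit _ 4 "Tools" (by decide), pvEmit _ 5 "Cloud" (by decide),
      pvEmit _ 6 "Methodologies" (by decide), pvEmit _ 7 "Other" (by decide)]
  simp only [e1, e2, e3, e4, e5, e6, e7, e8, List.append_assoc]

-- ===== VERDICT (by name: the statement is the Claim_ definition above) =====
theorem categorize_skills_spec : Claim_equal_categorize_skills := by
  intro skills _
  unfold Spec_categorize_skills
  rw [pvCanonA, pvCanonB]
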